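-- pv_equiv track=rewrite | github.com/jhmarryme/Python-in-action | inbox/2024_company_algorithm/A05_连续区域/entry.py | find_successive_area_number
-- ===== SOURCE A (Python) =====
-- from collections import deque
-- from typing import List
--
-- def find_successive_area_number(bits: List[List[bool]], n: int, m: int) -> int:
--     """
--     Counts the number of connected regions of 1's in a 2D bitmap.
--
--     Parameters:
--     - bits (List[List[bool]]): 2D list representing the bitmap, where each sublist represents a row.
--     - n (int): Number of rows in the bitmap.
--     - m (int): Number of columns in the bitmap.
--
--     Returns:
--     - int: Number of connected regions of 1's.
--     """
--     if n == 0 or m == 0: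
--         return 0
--
--     # Directions: 8 possible moves (including diagonals)
--     directions = [(-1, -1), (-1, 0), (-1, 1),
--                   (0, -1),          (0, 1),
--                   (1, -1),  (1, 0),  (1, 1)]
--
--     region_count = 0
--
--     for i in range(n):
--         for j in range(m):
--             if bits[i][j]:
--                 region_count += 1
--                 # Start BFS from this cell
--                 queue = deque()
--                 queue.append((i, j))
--                 bits[i][j] = False  # Mark as visited
--
--                 while queue:
--                     x, y = queue.popleft()
--                     for dx, dy in directions:
--                         new_x, new_y = x + dx, y + dy
--                         # Check boundaries
--                         if 0 <= new_x < n and 0 <= new_y < m and bits[new_x][new_y]: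
--                             queue.append((new_x, new_y))
--                             bits[new_x][new_y] = False  # Mark as visited
--
--     return region_count
-- ===== SOURCE B (Python) =====
-- def find_successive_area_number(bits, n, m):
--     """
--     Counts 8-connected regions of True cells without destroying the bitmap:
--     a region is counted exactly at its first cell in row-major order, which
--     is detected by a non-mutating search that looks for any earlier cell of
--     the same region.  (The original clears the visited cells of `bits` in
--     place; this version leaves `bits` untouched — the return value is the
--     same.)
--     """
--     if n <= 0 or m <= 0:
--         return 0
--     count = 0
--     for i in range(n):
--         for j in range(m):
--             if bits[i][j] and _is_region_head(bits, n, m, i, j):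
--                 count += 1
--     return count
--
--
-- def _is_region_head(bits, n, m, i, j):
--     """True iff no cell of (i, j)'s region precedes (i, j) in row-major order."""
--     seen = {(i, j)}
--     todo = [(i, j)]
--     while todo:
--         x, y = todo.pop()
--         if (x, y) < (i, j):
--             return False
--         for dx in (1, 0, -1):
--             for dy in (1, 0, -1):
--                 nx, ny = x + dx, y + dy
--                 if 0 <= nx < n and 0 <= ny < m and bits[nx][ny] and (nx, ny) not in seen:
--                     seen.add((nx, ny))
--                     todo.append((nx, ny))
--     return True
-- ===== Notes on version B (the rewrite author's own statement) =====
-- stated objective: alternative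
-- what changed: The destructive count (mutating BFS that erases each region as it is found, so a region is counted when the sweep first hits a still-uncleared cell) is replaced by a pure region-head count: bits is never modified, and a True cell is counted exactly when a non-mutating visited-set search of its region finds no cell that precedes it in row-major order.
import Mathlib
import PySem

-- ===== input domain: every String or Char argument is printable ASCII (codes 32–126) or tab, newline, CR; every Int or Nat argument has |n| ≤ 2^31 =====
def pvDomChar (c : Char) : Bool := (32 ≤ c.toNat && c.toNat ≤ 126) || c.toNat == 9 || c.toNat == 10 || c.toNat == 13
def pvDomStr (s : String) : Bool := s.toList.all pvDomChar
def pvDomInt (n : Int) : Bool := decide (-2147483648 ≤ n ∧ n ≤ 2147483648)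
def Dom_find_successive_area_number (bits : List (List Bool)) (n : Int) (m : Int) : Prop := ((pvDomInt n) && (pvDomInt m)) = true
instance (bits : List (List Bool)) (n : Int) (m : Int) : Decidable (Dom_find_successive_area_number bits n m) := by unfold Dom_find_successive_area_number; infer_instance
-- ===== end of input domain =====

-- B replaces A's destructive counting (a mutating BFS erases each region when the
-- sweep hits a still-uncleared cell) by a pure region-head count: a True cell is
-- counted iff a non-mutating visited-set search of its region finds no cell that
-- precedes it in row-major order.  The equivalence is about the RETURN value:
-- Python A clears the visited cells of `bits` in place, Python B does not mutate.

-- ===== PORT A =====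
-- shared accessor helpers: cell read / clear on the nested list; exact for the
-- bounds-guarded accesses both Pythons perform (inside Pre_ every read/write
-- that matters is at 0 ≤ x < n ≤ len(bits), 0 ≤ y < m ≤ len(row))
def pvCell (g : List (List Bool)) (x y : Int) : Bool :=
  if 0 ≤ x ∧ 0 ≤ y then (g.getD x.toNat []).getD y.toNat false else false

def pvSet (g : List (List Bool)) (x y : Int) : List (List Bool) :=
  if 0 ≤ x ∧ 0 ≤ y then g.modify x.toNat (fun row => row.set y.toNat false) else g

def pvTrueCount (g : List (List Bool)) : Nat := (g.map fun r => r.count true).sum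

def pvDirections : List (Int × Int) :=
  [(-1,-1),(-1,0),(-1,1),(0,-1),(0,1),(1,-1),(1,0),(1,1)]

-- one `for dx, dy in directions` round of A's BFS: check bounds and liveness,
-- mark on enqueue, append to the queue's right end
def pvBfsStep (n m x y : Int) (st : List (List Bool) × List (Int × Int)) (d : Int × Int) :
    List (List Bool) × List (Int × Int) :=
  if 0 ≤ x + d.1 ∧ x + d.1 < n ∧ 0 ≤ y + d.2 ∧ y + d.2 < m ∧
      pvCell st.1 (x + d.1) (y + d.2) = true then
    (pvSet st.1 (x + d.1) (y + d.2), st.2 ++ [(x + d.1, y + d.2)])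
  else st

def pvBfsExpand (n m x y : Int) (st : List (List Bool) × List (Int × Int)) :
    List (List Bool) × List (Int × Int) :=
  pvDirections.foldl (pvBfsStep n m x y) st

-- A's `while queue` loop; popleft = head.  The fuel is a totality guard only:
-- live-cells + queue-length sinks by exactly one per iteration, so the fuel
-- A is started with (pvTrueCount g + 1, one-element queue) never runs out.
def pvBfsLoop (n m : Int) : Nat → List (List Bool) → List (Int × Int) → List (List Bool)
  | 0, g, _ => g
  | _ + 1, g, [] => g
  | fuel + 1, g, c :: q =>
    let st := pvBfsExpand n m c.1 c.2 (g, q)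
    pvBfsLoop n m fuel st.1 st.2

def find_successive_area_number (bits : List (List Bool)) (n : Int) (m : Int) : Int :=
  if n = 0 ∨ m = 0 then 0
  -- index-in-range totality guard: outside it Python raises IndexError before
  -- finishing (or, for n > len(bits) with m < 0, returns 0 after an empty scan
  -- of n rows — 0 is returned here too); inside Pre_ it is inert
  else if ¬ (n ≤ (bits.length : Int) ∧ ∀ row ∈ bits.take n.toNat, m ≤ (row.length : Int)) then 0
  else
    ((PySem.List.pyRange 0 n 1).foldl (fun st i =>
        (PySem.List.pyRange 0 m 1).foldl (fun (st : List (List Bool) × Int) j =>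
          if pvCell st.1 i j = true then
            (pvBfsLoop n m (pvTrueCount (pvSet st.1 i j) + 1) (pvSet st.1 i j) [(i, j)],
             st.2 + 1)
          else st) st) (bits, 0)).2

-- ===== PORT B =====
-- B's `for dx in (1, 0, -1): for dy in (1, 0, -1)` double loop, flattened
def pvOffsets : List (Int × Int) :=
  [(1,1),(1,0),(1,-1),(0,1),(0,0),(0,-1),(-1,1),(-1,0),(-1,-1)]

-- one neighbour probe of the helper: bounds check, cell read on the
-- UNMUTATED bitmap, membership test against the visited set, push
def pvSeenPush (bits : List (List Bool)) (n m x y : Int)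
    (st : List (Int × Int) × List (Int × Int)) (d : Int × Int) :
    List (Int × Int) × List (Int × Int) :=
  if 0 ≤ x + d.1 ∧ x + d.1 < n ∧ 0 ≤ y + d.2 ∧ y + d.2 < m ∧
      pvCell bits (x + d.1) (y + d.2) = true ∧ (x + d.1, y + d.2) ∉ st.1 then
    (st.1 ++ [(x + d.1, y + d.2)], (x + d.1, y + d.2) :: st.2)
  else st

-- B's `while todo` loop (todo.pop() pops the right end; the port conses on the
-- left and pops the head — the same LIFO order).  The fuel is a totality guard
-- only: every iteration pops one entry and every push adds a fresh in-bounds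
-- cell to `seen`, so n*m+1 units never run out.
def pvHeadLoop (bits : List (List Bool)) (n m i j : Int) :
    Nat → List (Int × Int) → List (Int × Int) → Bool
  | 0, _, _ => true
  | _ + 1, _, [] => true
  | fuel + 1, seen, c :: rest =>
    if c.1 < i ∨ (c.1 = i ∧ c.2 < j) then false
    else
      pvHeadLoop bits n m i j fuel
        (pvOffsets.foldl (pvSeenPush bits n m c.1 c.2) (seen, rest)).1
        (pvOffsets.foldl (pvSeenPush bits n m c.1 c.2) (seen, rest)).2

-- _is_region_head(bits, n, m, i, j)
def pvIsHead (bits : List (List Bool)) (n m i j : Int) : Bool :=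
  pvHeadLoop bits n m i j (n.toNat * m.toNat + 1) [(i, j)] [(i, j)]

def find_successive_area_number_alt (bits : List (List Bool)) (n : Int) (m : Int) : Int :=
  if n ≤ 0 ∨ m ≤ 0 then 0
  -- index-in-range totality guard: outside it Python B raises IndexError
  -- before finishing; inside Pre_ it is inert
  else if ¬ (n ≤ (bits.length : Int) ∧ ∀ row ∈ bits.take n.toNat, m ≤ (row.length : Int)) then 0
  else
    (PySem.List.pyRange 0 n 1).foldl (fun (c : Int) i =>
      (PySem.List.pyRange 0 m 1).foldl (fun (c : Int) j =>
        if pvCell bits i j && pvIsHead bits n m i j then c + 1 else c) c) 0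

-- ===== PRECONDITION & SPEC =====
-- Pre_ excludes exactly the inputs on which Python A raises IndexError:
-- n, m positive but the bitmap has fewer than n rows, or one of the first
-- n rows is shorter than m.
def Pre_find_successive_area_number (bits : List (List Bool)) (n : Int) (m : Int) : Prop :=
  n ≤ 0 ∨ m ≤ 0 ∨ (n ≤ (bits.length : Int) ∧ ∀ row ∈ bits.take n.toNat, m ≤ (row.length : Int))

instance (bits : List (List Bool)) (n : Int) (m : Int) :
    Decidable (Pre_find_successive_area_number bits n m) := by
  unfold Pre_find_successive_area_number; infer_instance

def pvWitness_find_successive_area_number : List (List Bool) × Int × Int :=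
  ([[true, false], [false, true]], 2, 2)

def Spec_find_successive_area_number (bits : List (List Bool)) (n : Int) (m : Int) (out : Int) : Prop := out = find_successive_area_number_alt bits n m
instance (bits : List (List Bool)) (n : Int) (m : Int) (out : Int) : Decidable (Spec_find_successive_area_number bits n m out) := by unfold Spec_find_successive_area_number; infer_instance

-- ===== CLAIM (what is proved, stated in full; the proofs are below) =====
def Claim_equal_find_successive_area_number : Prop := ∀ (bits : List (List Bool)) (n : Int) (m : Int), Dom_find_successive_area_number bits n m → Pre_find_successive_area_number bits n m → Spec_find_successive_area_number bits n m (find_successive_area_number bits n m)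

-- ===== LEMMAS AND PROOFS =====

-- proof-only abstractions: bounds, row-major order, shape, one 8-neighbour move
-- through live in-bounds cells, and its reflexive-transitive closure
def pvInB (n m : Int) (c : Int × Int) : Prop :=
  0 ≤ c.1 ∧ c.1 < n ∧ 0 ≤ c.2 ∧ c.2 < m

def pvLex (a b : Int × Int) : Prop := a.1 < b.1 ∨ (a.1 = b.1 ∧ a.2 < b.2)

def pvShape (g : List (List Bool)) : List Nat := g.map List.length

def pvStep (g : List (List Bool)) (n m : Int) (a b : Int × Int) : Prop :=
  (b.1 - a.1, b.2 - a.2) ∈ pvDirections ∧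
    0 ≤ b.1 ∧ b.1 < n ∧ 0 ≤ b.2 ∧ b.2 < m ∧ pvCell g b.1 b.2 = true

def pvGood (g : List (List Bool)) (n m : Int) (c : Int × Int) : Prop :=
  pvInB n m c ∧ pvCell g c.1 c.2 = true

def pvReach (g : List (List Bool)) (n m : Int) (s c : Int × Int) : Prop :=
  Relation.ReflTransGen (pvStep g n m) s c

-- basic facts about the accessors
lemma pvCell_set (g : List (List Bool)) (x y a b : Int) :
    pvCell (pvSet g x y) a b = if a = x ∧ b = y then false else pvCell g a b := by
  by_cases hxy : 0 ≤ x ∧ 0 ≤ y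
  case neg =>
    have hset : pvSet g x y = g := by unfold pvSet; rw [if_neg hxy]
    rw [hset]
    by_cases hc : a = x ∧ b = y
    · obtain ⟨rfl, rfl⟩ := hc
      rw [if_pos ⟨rfl, rfl⟩]
      unfold pvCell; rw [if_neg hxy]
    · rw [if_neg hc]
  case pos =>
    by_cases hab : 0 ≤ a ∧ 0 ≤ b
    case neg =>
      have h1 : pvCell (pvSet g x y) a b = false := by unfold pvCell; rw [if_neg hab]
      have h2 : pvCell g a b = false := by unfold pvCell; rw [if_neg hab]
      rw [h1, h2]
      split <;> rfl
    case pos =>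
      unfold pvCell pvSet
      rw [if_pos hab, if_pos hab, if_pos hxy]
      simp only [List.getD_eq_getElem?_getD, List.getElem?_modify, Option.map_eq_map]
      cases hg : g[a.toNat]? with
      | none => simp
      | some r =>
        simp only [Option.map_some, Option.getD_some]
        by_cases hax : a = x
        · subst hax
          rw [if_pos rfl]
          by_cases hby : b = y
          · subst hby
            rw [if_pos ⟨rfl, rfl⟩]
            have hv : ((r.set b.toNat false)[b.toNat]?).getD false = false := by
              rw [List.getElem?_set, if_pos rfl]
              split <;> rfl
            rw [hv]
          · rw [if_neg (by tauto)]
            have hbn : ¬ (y.toNat = b.toNat) := by omega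
            rw [List.getElem?_set, if_neg hbn]
        · have hxn : ¬ (x.toNat = a.toNat) := by omega
          rw [if_neg hxn, if_neg (by tauto)]

lemma pvShape_set (g : List (List Bool)) (x y : Int) : pvShape (pvSet g x y) = pvShape g := by
  unfold pvSet pvShape
  split
  · apply List.ext_getElem
    · simp
    · intro i h1 h2
      simp only [List.getElem_map, List.getElem_modify]
      split <;> simp
  · rfl

lemma pvTrueCount_set (g : List (List Bool)) (x y : Int) (h : pvCell g x y = true) :
    pvTrueCount (pvSet g x y) + 1 = pvTrueCount g := by
  have hxy : 0 ≤ x ∧ 0 ≤ y := by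
    by_contra hxy
    unfold pvCell at h; rw [if_neg hxy] at h; exact Bool.false_ne_true h
  unfold pvCell at h
  rw [if_pos hxy] at h
  simp only [List.getD_eq_getElem?_getD] at h
  unfold pvSet; rw [if_pos hxy]
  cases hrow : g[x.toNat]? with
  | none => rw [hrow] at h; exact absurd h (by simp)
  | some r =>
    rw [hrow] at h
    simp only [Option.getD_some] at h
    have hy : y.toNat < r.length := by
      by_contra hy
      rw [List.getElem?_eq_none (by omega)] at h
      exact absurd h (by simp)
    rw [List.getElem?_eq_getElem hy] at h
    simp only [Option.getD_some] at h
    induction g generalizing x with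
    | nil => simp at hrow
    | cons r0 t ih =>
      by_cases hx0 : x.toNat = 0
      · rw [hx0] at hrow
        simp only [List.getElem?_cons_zero, Option.some.injEq] at hrow
        subst hrow
        rw [hx0]
        have hmod : ((r0 :: t).modify 0 fun row => row.set y.toNat false) =
            (r0.set y.toNat false) :: t := by simp [List.modify]
        rw [hmod]
        unfold pvTrueCount
        simp only [List.map_cons, List.sum_cons]
        have hcnt : List.count true (r0.set y.toNat false) = List.count true r0 - 1 := by
          rw [List.count_set hy]
          simp [h]
        have hpos : 0 < List.count true r0 := by
          refine List.count_pos_iff.mpr ?_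
          rw [← h]; exact List.getElem_mem hy
        omega
      · obtain ⟨k, hk⟩ : ∃ k, x.toNat = k + 1 := ⟨x.toNat - 1, by omega⟩
        rw [hk] at hrow
        simp only [List.getElem?_cons_succ] at hrow
        rw [hk]
        have hmod : ((r0 :: t).modify (k + 1) fun row => row.set y.toNat false) =
            r0 :: t.modify k fun row => row.set y.toNat false := by simp [List.modify]
        rw [hmod]
        unfold pvTrueCount
        simp only [List.map_cons, List.sum_cons]
        have hih := ih (x := (k : Int)) ⟨by omega, hxy.2⟩ (by simpa using hrow)
        unfold pvTrueCount at hih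
        simp only [Int.toNat_natCast] at hih
        omega

-- reachability lemmas
lemma pvReach_mono (g g' : List (List Bool)) (n m : Int)
    (hsub : ∀ a b : Int, pvCell g' a b = true → pvCell g a b = true)
    (s c : Int × Int) (h : pvReach g' n m s c) : pvReach g n m s c := by
  refine Relation.ReflTransGen.mono ?_ h
  rintro u v ⟨hadj, h1, h2, h3, h4, hcell⟩
  exact ⟨hadj, h1, h2, h3, h4, hsub _ _ hcell⟩

lemma pvCut (g g' : List (List Bool)) (n m : Int) (P : Int × Int → Prop)
    (hg' : ∀ c : Int × Int, pvCell g' c.1 c.2 = true ↔ pvCell g c.1 c.2 = true ∧ ¬ P c)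
    (s c : Int × Int) (h : pvReach g n m s c) :
    P c ∨ pvReach g' n m s c ∨ ∃ b, P b ∧ pvReach g' n m b c := by
  unfold pvReach at h ⊢
  induction h with
  | refl => exact Or.inr (Or.inl Relation.ReflTransGen.refl)
  | @tail b c hbc hstep ih =>
    by_cases hPc : P c
    · exact Or.inl hPc
    · obtain ⟨hadj, h1, h2, h3, h4, hcell⟩ := hstep
      have hcell' : pvCell g' c.1 c.2 = true := (hg' c).mpr ⟨hcell, hPc⟩
      have hstep' : pvStep g' n m b c := ⟨hadj, h1, h2, h3, h4, hcell'⟩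
      rcases ih with hPb | hR | ⟨b', hb', hR⟩
      · exact Or.inr (Or.inr ⟨b, hPb, Relation.ReflTransGen.single hstep'⟩)
      · exact Or.inr (Or.inl (hR.tail hstep'))
      · exact Or.inr (Or.inr ⟨b', hb', hR.tail hstep'⟩)

lemma pvStep_iff (g : List (List Bool)) (n m x y : Int) (z : Int × Int) :
    pvStep g n m (x, y) z ↔
      ∃ d ∈ pvDirections, z = (x + d.1, y + d.2) ∧
        0 ≤ z.1 ∧ z.1 < n ∧ 0 ≤ z.2 ∧ z.2 < m ∧ pvCell g z.1 z.2 = true := by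
  constructor
  · rintro ⟨hadj, h1, h2, h3, h4, hc⟩
    refine ⟨(z.1 - x, z.2 - y), hadj, ?_, h1, h2, h3, h4, hc⟩
    obtain ⟨z1, z2⟩ := z
    simp only [Prod.mk.injEq]
    constructor <;> ring
  · rintro ⟨d, hd, hz, h1, h2, h3, h4, hc⟩
    refine ⟨?_, h1, h2, h3, h4, hc⟩
    rw [hz]
    simpa using hd

-- characterization of A's directions round
lemma pvExpandAux (n m x y : Int) :
    ∀ (ds : List (Int × Int)) (g : List (List Bool)) (q : List (Int × Int)), ds.Nodup →
    (∀ a b : Int, pvCell (ds.foldl (pvBfsStep n m x y) (g, q)).1 a b = true ↔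
        pvCell g a b = true ∧
          ¬ ∃ d ∈ ds, a = x + d.1 ∧ b = y + d.2 ∧ 0 ≤ a ∧ a < n ∧ 0 ≤ b ∧ b < m) ∧
    (∀ z : Int × Int, z ∈ (ds.foldl (pvBfsStep n m x y) (g, q)).2 ↔ z ∈ q ∨
        ∃ d ∈ ds, z = (x + d.1, y + d.2) ∧
          0 ≤ z.1 ∧ z.1 < n ∧ 0 ≤ z.2 ∧ z.2 < m ∧ pvCell g z.1 z.2 = true) ∧
    pvTrueCount (ds.foldl (pvBfsStep n m x y) (g, q)).1 +
        (ds.foldl (pvBfsStep n m x y) (g, q)).2.length = pvTrueCount g + q.length ∧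
    pvShape (ds.foldl (pvBfsStep n m x y) (g, q)).1 = pvShape g := by
  intro ds
  induction ds with
  | nil =>
    intro g q _
    refine ⟨?_, ?_, rfl, rfl⟩ <;> simp
  | cons d ds ih =>
    intro g q hnd
    have hd_not : d ∉ ds := (List.nodup_cons.mp hnd).1
    have hnd' := (List.nodup_cons.mp hnd).2
    rw [List.foldl_cons]
    by_cases hC : 0 ≤ x + d.1 ∧ x + d.1 < n ∧ 0 ≤ y + d.2 ∧ y + d.2 < m ∧
        pvCell g (x + d.1) (y + d.2) = true
    · have hstep : pvBfsStep n m x y (g, q) d =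
          (pvSet g (x + d.1) (y + d.2), q ++ [(x + d.1, y + d.2)]) := by
        unfold pvBfsStep; rw [if_pos hC]
      rw [hstep]
      obtain ⟨ih1, ih2, ih3, ih4⟩ := ih (pvSet g (x + d.1) (y + d.2)) (q ++ [(x + d.1, y + d.2)]) hnd'
      obtain ⟨hC1, hC2, hC3, hC4, hC5⟩ := hC
      refine ⟨?_, ?_, ?_, ?_⟩
      · intro a b
        rw [ih1 a b, pvCell_set]
        by_cases hP : a = x + d.1 ∧ b = y + d.2
        · rw [if_pos hP]
          constructor
          · rintro ⟨hf, -⟩; exact absurd hf (by simp)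
          · rintro ⟨hcell, hno⟩
            exact absurd ⟨d, List.mem_cons_self .., hP.1, hP.2, hP.1 ▸ hC1, hP.1 ▸ hC2,
              hP.2 ▸ hC3, hP.2 ▸ hC4⟩ hno
        · rw [if_neg hP]
          constructor
          · rintro ⟨hcell, hno⟩
            refine ⟨hcell, ?_⟩
            rintro ⟨d', hd', hcond⟩
            rcases List.mem_cons.mp hd' with rfl | hd'
            · exact hP ⟨hcond.1, hcond.2.1⟩
            · exact hno ⟨d', hd', hcond⟩
          · rintro ⟨hcell, hno⟩
            exact ⟨hcell, fun ⟨d', hd', hcond⟩ => hno ⟨d', List.mem_cons_of_mem _ hd', hcond⟩⟩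
      · intro z
        rw [ih2 z]
        have hzmem : z ∈ q ++ [(x + d.1, y + d.2)] ↔ z ∈ q ∨ z = (x + d.1, y + d.2) := by
          simp
        rw [hzmem]
        constructor
        · rintro ((hz | hz) | ⟨d', hd', hz, hb1, hb2, hb3, hb4, hcell⟩)
          · exact Or.inl hz
          · exact Or.inr ⟨d, List.mem_cons_self .., hz, hz ▸ hC1, hz ▸ hC2, hz ▸ hC3,
              hz ▸ hC4, hz ▸ hC5⟩
          · refine Or.inr ⟨d', List.mem_cons_of_mem _ hd', hz, hb1, hb2, hb3, hb4, ?_⟩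
            rw [pvCell_set] at hcell
            by_cases hzp : z.1 = x + d.1 ∧ z.2 = y + d.2
            · exfalso
              have : d' = d := by
                obtain ⟨d'1, d'2⟩ := d'; obtain ⟨dd1, dd2⟩ := d
                rw [hz] at hzp
                simp only [Prod.mk.injEq] at hzp ⊢
                omega
              exact hd_not (this ▸ hd')
            · rwa [if_neg hzp] at hcell
        · rintro (hz | ⟨d', hd', hz, hb1, hb2, hb3, hb4, hcell⟩)
          · exact Or.inl (Or.inl hz)
          · rcases List.mem_cons.mp hd' with rfl | hd'
            · exact Or.inl (Or.inr hz)
            · refine Or.inr ⟨d', hd', hz, hb1, hb2, hb3, hb4, ?_⟩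
              rw [pvCell_set]
              have hzp : ¬ (z.1 = x + d.1 ∧ z.2 = y + d.2) := by
                intro hzp
                have : d' = d := by
                  obtain ⟨d'1, d'2⟩ := d'; obtain ⟨dd1, dd2⟩ := d
                  rw [hz] at hzp
                  simp only [Prod.mk.injEq] at hzp ⊢
                  omega
                exact hd_not (this ▸ hd')
              rwa [if_neg hzp]
      · have htc := pvTrueCount_set g (x + d.1) (y + d.2) hC5
        simp only [List.length_append, List.length_cons, List.length_nil] at ih3 ⊢
        omega
      · exact ih4.trans (pvShape_set g (x + d.1) (y + d.2))
    · have hstep : pvBfsStep n m x y (g, q) d = (g, q) := by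
        unfold pvBfsStep; rw [if_neg hC]
      rw [hstep]
      obtain ⟨ih1, ih2, ih3, ih4⟩ := ih g q hnd'
      refine ⟨?_, ?_, ih3, ih4⟩
      · intro a b
        rw [ih1 a b]
        constructor
        · rintro ⟨hcell, hno⟩
          refine ⟨hcell, ?_⟩
          rintro ⟨d', hd', hcond⟩
          rcases List.mem_cons.mp hd' with rfl | hd'
          · obtain ⟨ha, hb, h1, h2, h3, h4⟩ := hcond
            subst ha; subst hb
            exact hC ⟨h1, h2, h3, h4, hcell⟩
          · exact hno ⟨d', hd', hcond⟩
        · rintro ⟨hcell, hno⟩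
          exact ⟨hcell, fun ⟨d', hd', hcond⟩ => hno ⟨d', List.mem_cons_of_mem _ hd', hcond⟩⟩
      · intro z
        rw [ih2 z]
        constructor
        · rintro (hz | ⟨d', hd', hcond⟩)
          · exact Or.inl hz
          · exact Or.inr ⟨d', List.mem_cons_of_mem _ hd', hcond⟩
        · rintro (hz | ⟨d', hd', hcond⟩)
          · exact Or.inl hz
          · rcases List.mem_cons.mp hd' with rfl | hd'
            · obtain ⟨hzeq, h1, h2, h3, h4, hcell⟩ := hcond
              subst hzeq
              exact absurd ⟨h1, h2, h3, h4, hcell⟩ hC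
            · exact Or.inr ⟨d', hd', hcond⟩

-- characterization of A's BFS loop: it erases exactly the cells reachable from
-- the (already erased) queue entries
lemma pvBfsChar (n m : Int) :
    ∀ (fuel : Nat) (g : List (List Bool)) (q : List (Int × Int)),
      pvTrueCount g + q.length ≤ fuel →
      (∀ s ∈ q, pvCell g s.1 s.2 = false) →
      pvShape (pvBfsLoop n m fuel g q) = pvShape g ∧
      ∀ c : Int × Int, pvCell (pvBfsLoop n m fuel g q) c.1 c.2 = true ↔
        pvCell g c.1 c.2 = true ∧ ¬ ∃ s ∈ q, pvReach g n m s c := by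
  intro fuel
  induction fuel with
  | zero =>
    intro g q hfuel _
    have hq : q = [] := by
      cases q with
      | nil => rfl
      | cons c qs => simp at hfuel
    subst hq
    exact ⟨rfl, by intro c; simp [pvBfsLoop]⟩
  | succ fuel ih =>
    intro g q hfuel hdead
    rcases q with _ | ⟨⟨cx, cy⟩, qs⟩
    · exact ⟨rfl, by intro c; simp [pvBfsLoop]⟩
    simp only [List.length_cons] at hfuel
    have hloop : pvBfsLoop n m (fuel + 1) g ((cx, cy) :: qs) =
        pvBfsLoop n m fuel (pvBfsExpand n m cx cy (g, qs)).1
          (pvBfsExpand n m cx cy (g, qs)).2 := rfl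
    obtain ⟨e1, e2, e3, e4⟩ := pvExpandAux n m cx cy pvDirections g qs (by decide)
    have hg' : ∀ c : Int × Int, pvCell (pvBfsExpand n m cx cy (g, qs)).1 c.1 c.2 = true ↔
        pvCell g c.1 c.2 = true ∧ ¬ pvStep g n m (cx, cy) c := by
      intro c
      rw [show (pvBfsExpand n m cx cy (g, qs)).1 =
          (pvDirections.foldl (pvBfsStep n m cx cy) (g, qs)).1 from rfl, e1 c.1 c.2]
      constructor
      · rintro ⟨hc, hno⟩
        refine ⟨hc, ?_⟩
        intro hstep
        rcases (pvStep_iff g n m cx cy c).mp hstep with ⟨d, hd, hzc, h1, h2, h3, h4, -⟩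
        refine hno ⟨d, hd, ?_, ?_, h1, h2, h3, h4⟩
        · rw [hzc]
        · rw [hzc]
      · rintro ⟨hc, hnostep⟩
        refine ⟨hc, ?_⟩
        rintro ⟨d, hd, ha, hb, h1, h2, h3, h4⟩
        have hz : c = (cx + d.1, cy + d.2) := by
          obtain ⟨c1, c2⟩ := c
          simp only at ha hb
          rw [ha, hb]
        exact hnostep ((pvStep_iff g n m cx cy c).mpr ⟨d, hd, hz, h1, h2, h3, h4, hc⟩)
    have hq' : ∀ z, z ∈ (pvBfsExpand n m cx cy (g, qs)).2 ↔
        z ∈ qs ∨ pvStep g n m (cx, cy) z := by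
      intro z
      rw [show (pvBfsExpand n m cx cy (g, qs)).2 =
          (pvDirections.foldl (pvBfsStep n m cx cy) (g, qs)).2 from rfl, e2 z, pvStep_iff]
    have hdead' : ∀ s ∈ (pvBfsExpand n m cx cy (g, qs)).2,
        pvCell (pvBfsExpand n m cx cy (g, qs)).1 s.1 s.2 = false := by
      intro s hs
      cases hcell : pvCell (pvBfsExpand n m cx cy (g, qs)).1 s.1 s.2 with
      | false => rfl
      | true =>
        exfalso
        obtain ⟨hcg, hnostep⟩ := (hg' s).mp hcell
        rcases (hq' s).mp hs with hs' | hs'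
        · have := hdead s (List.mem_cons_of_mem _ hs')
          rw [this] at hcg; exact Bool.false_ne_true hcg
        · exact hnostep hs'
    have hfuel' : pvTrueCount (pvBfsExpand n m cx cy (g, qs)).1 +
        (pvBfsExpand n m cx cy (g, qs)).2.length ≤ fuel := by
      have : pvTrueCount (pvBfsExpand n m cx cy (g, qs)).1 +
          (pvBfsExpand n m cx cy (g, qs)).2.length = pvTrueCount g + qs.length := e3
      omega
    obtain ⟨ihs, ihc⟩ := ih (pvBfsExpand n m cx cy (g, qs)).1
      (pvBfsExpand n m cx cy (g, qs)).2 hfuel' hdead'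
    rw [hloop]
    refine ⟨ihs.trans (by
      rw [show (pvBfsExpand n m cx cy (g, qs)).1 =
          (pvDirections.foldl (pvBfsStep n m cx cy) (g, qs)).1 from rfl]
      exact e4), ?_⟩
    intro c
    rw [ihc c]
    constructor
    · rintro ⟨hcE, hno⟩
      have hcg := ((hg' c).mp hcE).1
      have hPc := ((hg' c).mp hcE).2
      refine ⟨hcg, ?_⟩
      rintro ⟨s, hs, hreach⟩
      rcases List.mem_cons.mp hs with rfl | hs
      · rcases Relation.ReflTransGen.cases_head hreach with heq | ⟨b, hb, hbc⟩
        · have := hdead (cx, cy) (List.mem_cons_self ..)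
          rw [← heq] at hcg
          rw [this] at hcg; exact Bool.false_ne_true hcg
        · rcases pvCut g (pvBfsExpand n m cx cy (g, qs)).1 n m
            (pvStep g n m (cx, cy)) hg' b c hbc with hPc' | hR | ⟨b', hPb', hR⟩
          · exact hPc hPc'
          · exact hno ⟨b, (hq' b).mpr (Or.inr hb), hR⟩
          · exact hno ⟨b', (hq' b').mpr (Or.inr hPb'), hR⟩
      · rcases pvCut g (pvBfsExpand n m cx cy (g, qs)).1 n m
          (pvStep g n m (cx, cy)) hg' s c hreach with hPc' | hR | ⟨b', hPb', hR⟩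
        · exact hPc hPc'
        · exact hno ⟨s, (hq' s).mpr (Or.inl hs), hR⟩
        · exact hno ⟨b', (hq' b').mpr (Or.inr hPb'), hR⟩
    · rintro ⟨hcg, hno⟩
      have hPc : ¬ pvStep g n m (cx, cy) c := by
        intro hP
        exact hno ⟨(cx, cy), List.mem_cons_self .., Relation.ReflTransGen.single hP⟩
      refine ⟨(hg' c).mpr ⟨hcg, hPc⟩, ?_⟩
      rintro ⟨s, hs, hreach⟩
      have hmono : pvReach g n m s c :=
        pvReach_mono g (pvBfsExpand n m cx cy (g, qs)).1 n m
          (fun a b hab => ((hg' (a, b)).mp hab).1) s c hreach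
      rcases (hq' s).mp hs with hs' | hs'
      · exact hno ⟨s, List.mem_cons_of_mem _ hs', hmono⟩
      · exact hno ⟨(cx, cy), List.mem_cons_self ..,
          Relation.ReflTransGen.head hs' hmono⟩

-- the devastated-seed characterization: A's per-seed BFS erases exactly the
-- cells reachable from the seed
lemma pvSeedChar (n m : Int) (g : List (List Bool)) (i j : Int) (h : pvCell g i j = true) :
    ∀ x y : Int,
      pvCell (pvBfsLoop n m (pvTrueCount (pvSet g i j) + 1) (pvSet g i j) [(i, j)]) x y = true ↔
        pvCell g x y = true ∧ ¬ pvReach g n m (i, j) (x, y) := by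
  have hdead0 : pvCell (pvSet g i j) i j = false := by
    rw [pvCell_set, if_pos ⟨rfl, rfl⟩]
  obtain ⟨sA, cA⟩ := pvBfsChar n m (pvTrueCount (pvSet g i j) + 1) (pvSet g i j) [(i, j)]
    (by simp) (by rintro s hs; rcases List.mem_singleton.mp hs with rfl; exact hdead0)
  have hg' : ∀ c : Int × Int, pvCell (pvSet g i j) c.1 c.2 = true ↔
      pvCell g c.1 c.2 = true ∧ ¬ (c = (i, j)) := by
    intro c
    rw [pvCell_set]
    by_cases hc : c.1 = i ∧ c.2 = j
    · rw [if_pos hc]; simp [Prod.ext_iff, hc]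
    · rw [if_neg hc]; simp only [Prod.ext_iff]; tauto
  have hmono : ∀ a b : Int, pvCell (pvSet g i j) a b = true → pvCell g a b = true :=
    fun a b hab => ((hg' (a, b)).mp hab).1
  intro x y
  rw [cA (x, y)]
  constructor
  · rintro ⟨hc0, hno⟩
    obtain ⟨hcg, hcne⟩ := (hg' (x, y)).mp hc0
    refine ⟨hcg, ?_⟩
    intro hreach
    rcases pvCut g (pvSet g i j) n m (· = (i, j)) hg' (i, j) (x, y) hreach with
      hPc | hR | ⟨b', hPb', hR⟩
    · exact hcne hPc
    · exact hno ⟨(i, j), List.mem_singleton.mpr rfl, hR⟩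
    · exact hno ⟨(i, j), List.mem_singleton.mpr rfl, hPb' ▸ hR⟩
  · rintro ⟨hcg, hno⟩
    have hcne : ¬ ((x, y) = ((i : Int), (j : Int))) := fun heq =>
      hno (heq ▸ Relation.ReflTransGen.refl)
    refine ⟨(hg' (x, y)).mpr ⟨hcg, hcne⟩, ?_⟩
    rintro ⟨s, hs, hreach⟩
    rcases List.mem_singleton.mp hs with rfl
    exact hno (pvReach_mono g (pvSet g i j) n m hmono _ _ hreach)

-- symmetry of the step relation on good cells (the direction set is closed
-- under negation), hence symmetry of reachability from a good cell
lemma pvDirections_neg : ∀ d ∈ pvDirections, ((-d.1, -d.2) : Int × Int) ∈ pvDirections := by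
  decide

lemma pvStep_symm (g : List (List Bool)) (n m : Int) (a b : Int × Int)
    (ha : pvGood g n m a) (h : pvStep g n m a b) : pvStep g n m b a := by
  obtain ⟨hadj, -⟩ := h
  refine ⟨?_, ha.1.1, ha.1.2.1, ha.1.2.2.1, ha.1.2.2.2, ha.2⟩
  have heq : ((a.1 - b.1, a.2 - b.2) : Int × Int) = (-(b.1 - a.1), -(b.2 - a.2)) := by
    simp only [Prod.mk.injEq]; constructor <;> ring
  rw [heq]
  exact pvDirections_neg _ hadj

lemma pvReach_symm (g : List (List Bool)) (n m : Int) (a c : Int × Int)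
    (ha : pvGood g n m a) (h : pvReach g n m a c) :
    pvReach g n m c a ∧ (c = a ∨ pvGood g n m c) := by
  induction h with
  | refl => exact ⟨Relation.ReflTransGen.refl, Or.inl rfl⟩
  | @tail b c hb hstep ih =>
    have hGb : pvGood g n m b := by
      rcases ih.2 with h' | h'
      · exact h' ▸ ha
      · exact h'
    have hGc : pvGood g n m c :=
      ⟨⟨hstep.2.1, hstep.2.2.1, hstep.2.2.2.1, hstep.2.2.2.2.1⟩, hstep.2.2.2.2.2⟩
    exact ⟨Relation.ReflTransGen.head (pvStep_symm g n m b c hGb hstep) ih.1, Or.inr hGc⟩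

-- transferring reachability between the original bitmap and a partially
-- erased copy, when the erased set is closed under reachability
lemma pvReachTransfer (bits g : List (List Bool)) (n m : Int) (E : Int × Int → Prop)
    (HE : ∀ x y : Int, pvCell g x y = true ↔ pvCell bits x y = true ∧ ¬ E (x, y))
    (Ecl : ∀ c d : Int × Int, E c → pvReach bits n m c d → E d)
    (p : Int × Int) (hInB : pvInB n m p) (hp : pvCell g p.1 p.2 = true) :
    ∀ c, pvReach g n m p c ↔ pvReach bits n m p c := by
  have hbp := (HE p.1 p.2).mp hp
  have hGp : pvGood bits n m p := ⟨hInB, hbp.1⟩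
  intro c
  constructor
  · exact pvReach_mono bits g n m (fun a b hab => ((HE a b).mp hab).1) p c
  · intro h
    induction h with
    | refl => exact Relation.ReflTransGen.refl
    | @tail b c hb hstep ihg =>
      have hreach_pc : pvReach bits n m p c := hb.tail hstep
      have hnEc : ¬ E c := by
        intro hEc
        have hsymm := (pvReach_symm bits n m p c hGp hreach_pc).1
        exact hbp.2 (Ecl c p hEc hsymm)
      have hgc : pvCell g c.1 c.2 = true :=
        (HE c.1 c.2).mpr ⟨hstep.2.2.2.2.2, hnEc⟩
      exact ihg.tail ⟨hstep.1, hstep.2.1, hstep.2.2.1, hstep.2.2.2.1, hstep.2.2.2.2.1, hgc⟩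

-- offsets vs directions
lemma pvOffsets_dir : ∀ d : Int × Int, d ∈ pvOffsets → d ≠ (0, 0) → d ∈ pvDirections := by
  decide

lemma pvDir_offset : ∀ d ∈ pvDirections, d ∈ pvOffsets := by decide

-- a Nodup list of in-bounds cells has at most n*m elements
lemma pvLenBound (n m : Int) (l : List (Int × Int)) (hnd : l.Nodup)
    (hb : ∀ c ∈ l, pvInB n m c) : l.length ≤ n.toNat * m.toNat := by
  have hsub : l.toFinset ⊆ Finset.Ico 0 n ×ˢ Finset.Ico 0 m := by
    intro c hc
    have h := hb c (List.mem_toFinset.mp hc)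
    simp only [Finset.mem_product, Finset.mem_Ico]
    exact ⟨⟨h.1, h.2.1⟩, h.2.2.1, h.2.2.2⟩
  have h1 : l.toFinset.card = l.length := List.toFinset_card_of_nodup hnd
  have h2 := Finset.card_le_card hsub
  rw [Finset.card_product] at h2
  simp only [Int.card_Ico, Int.sub_zero] at h2
  omega

-- subsets of Nodup lists have shorter length (via toFinset)
lemma pvNodupSubLen (l1 l2 : List (Int × Int)) (h1 : l1.Nodup) (h2 : l2.Nodup)
    (hs : ∀ c ∈ l1, c ∈ l2) : l1.length ≤ l2.length := by
  have hsub : l1.toFinset ⊆ l2.toFinset := by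
    intro c hc
    exact List.mem_toFinset.mpr (hs c (List.mem_toFinset.mp hc))
  have := Finset.card_le_card hsub
  rwa [List.toFinset_card_of_nodup h1, List.toFinset_card_of_nodup h2] at this

-- characterization of B's 9-neighbour push round
lemma pvPushAux (bits : List (List Bool)) (n m x y : Int) :
    ∀ (ds : List (Int × Int)), ds.Nodup →
    ∀ (seen rest : List (Int × Int)), seen.Nodup → rest.Nodup → (∀ c ∈ rest, c ∈ seen) →
    (∀ z : Int × Int, z ∈ (ds.foldl (pvSeenPush bits n m x y) (seen, rest)).1 ↔ z ∈ seen ∨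
        ∃ d ∈ ds, z = (x + d.1, y + d.2) ∧ pvInB n m z ∧ pvCell bits z.1 z.2 = true ∧ z ∉ seen) ∧
    (∀ z : Int × Int, z ∈ (ds.foldl (pvSeenPush bits n m x y) (seen, rest)).2 ↔ z ∈ rest ∨
        ∃ d ∈ ds, z = (x + d.1, y + d.2) ∧ pvInB n m z ∧ pvCell bits z.1 z.2 = true ∧ z ∉ seen) ∧
    (ds.foldl (pvSeenPush bits n m x y) (seen, rest)).1.Nodup ∧
    (ds.foldl (pvSeenPush bits n m x y) (seen, rest)).2.Nodup ∧
    (ds.foldl (pvSeenPush bits n m x y) (seen, rest)).1.length + rest.length =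
      (ds.foldl (pvSeenPush bits n m x y) (seen, rest)).2.length + seen.length := by
  intro ds
  induction ds with
  | nil =>
    intro _ seen rest hns hnr hsub
    refine ⟨by simp, by simp, hns, hnr, by simp [Nat.add_comm]⟩
  | cons d ds ih =>
    intro hnd seen rest hns hnr hsub
    have hd_not : d ∉ ds := (List.nodup_cons.mp hnd).1
    have hnd' := (List.nodup_cons.mp hnd).2
    rw [List.foldl_cons]
    have hne : ∀ d' ∈ ds, ((x + d'.1, y + d'.2) : Int × Int) ≠ (x + d.1, y + d.2) := by
      intro d' hd' heq
      apply hd_not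
      have : d' = d := by
        obtain ⟨a1, a2⟩ := d'; obtain ⟨b1, b2⟩ := d
        simp only [Prod.mk.injEq] at heq ⊢
        omega
      exact this ▸ hd'
    by_cases hC : 0 ≤ x + d.1 ∧ x + d.1 < n ∧ 0 ≤ y + d.2 ∧ y + d.2 < m ∧
        pvCell bits (x + d.1) (y + d.2) = true ∧ ((x + d.1, y + d.2) : Int × Int) ∉ seen
    · have hstep : pvSeenPush bits n m x y (seen, rest) d =
          (seen ++ [(x + d.1, y + d.2)], (x + d.1, y + d.2) :: rest) := by
        unfold pvSeenPush; rw [if_pos hC]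
      rw [hstep]
      obtain ⟨hC1, hC2, hC3, hC4, hC5, hC6⟩ := hC
      have hcnr : ((x + d.1, y + d.2) : Int × Int) ∉ rest := fun hmem => hC6 (hsub _ hmem)
      have hns' : (seen ++ [(x + d.1, y + d.2)]).Nodup := by
        rw [List.nodup_append]
        refine ⟨hns, List.nodup_singleton _, ?_⟩
        intro a ha b hb
        rcases List.mem_singleton.mp hb with rfl
        exact fun heq => hC6 (heq ▸ ha)
      have hnr' : (((x + d.1, y + d.2) : Int × Int) :: rest).Nodup :=
        List.nodup_cons.mpr ⟨hcnr, hnr⟩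
      have hsub' : ∀ c ∈ ((x + d.1, y + d.2) : Int × Int) :: rest,
          c ∈ seen ++ [(x + d.1, y + d.2)] := by
        intro c hc
        rcases List.mem_cons.mp hc with rfl | hc
        · exact List.mem_append.mpr (Or.inr (List.mem_singleton.mpr rfl))
        · exact List.mem_append.mpr (Or.inl (hsub c hc))
      obtain ⟨ih1, ih2, ih3, ih4, ih5⟩ :=
        ih hnd' (seen ++ [(x + d.1, y + d.2)]) ((x + d.1, y + d.2) :: rest) hns' hnr' hsub'
      have hconv : ∀ z : Int × Int,
          (∃ d' ∈ ds, z = (x + d'.1, y + d'.2) ∧ pvInB n m z ∧ pvCell bits z.1 z.2 = true ∧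
            z ∉ seen ++ [(x + d.1, y + d.2)]) ↔
          (∃ d' ∈ ds, z = (x + d'.1, y + d'.2) ∧ pvInB n m z ∧ pvCell bits z.1 z.2 = true ∧
            z ∉ seen ∧ z ≠ ((x + d.1, y + d.2) : Int × Int)) := by
        intro z
        constructor
        · rintro ⟨d', hd', hz, hInB, hc, hnm⟩
          simp only [List.mem_append, List.mem_singleton, not_or] at hnm
          exact ⟨d', hd', hz, hInB, hc, hnm.1, hnm.2⟩
        · rintro ⟨d', hd', hz, hInB, hc, hn1, hn2⟩
          refine ⟨d', hd', hz, hInB, hc, ?_⟩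
          simp only [List.mem_append, List.mem_singleton, not_or]
          exact ⟨hn1, hn2⟩
      refine ⟨?_, ?_, ih3, ih4, ?_⟩
      · intro z
        rw [ih1 z, hconv z]
        constructor
        · rintro (hz | ⟨d', hd', hz, hInB, hc, hn1, -⟩)
          · rcases List.mem_append.mp hz with hz | hz
            · exact Or.inl hz
            · rcases List.mem_singleton.mp hz with rfl
              exact Or.inr ⟨d, List.mem_cons_self .., rfl, ⟨hC1, hC2, hC3, hC4⟩, hC5, hC6⟩
          · exact Or.inr ⟨d', List.mem_cons_of_mem _ hd', hz, hInB, hc, hn1⟩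
        · rintro (hz | ⟨d', hd', hz, hInB, hc, hn1⟩)
          · exact Or.inl (List.mem_append.mpr (Or.inl hz))
          · rcases List.mem_cons.mp hd' with rfl | hd'
            · exact Or.inl (List.mem_append.mpr (Or.inr (List.mem_singleton.mpr hz)))
            · by_cases hzc : z = ((x + d.1, y + d.2) : Int × Int)
              · exact Or.inl (List.mem_append.mpr (Or.inr (List.mem_singleton.mpr hzc)))
              · exact Or.inr ⟨d', hd', hz, hInB, hc, hn1, hzc⟩
      · intro z
        rw [ih2 z, hconv z]
        constructor
        · rintro (hz | ⟨d', hd', hz, hInB, hc, hn1, -⟩)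
          · rcases List.mem_cons.mp hz with rfl | hz
            · exact Or.inr ⟨d, List.mem_cons_self .., rfl, ⟨hC1, hC2, hC3, hC4⟩, hC5, hC6⟩
            · exact Or.inl hz
          · exact Or.inr ⟨d', List.mem_cons_of_mem _ hd', hz, hInB, hc, hn1⟩
        · rintro (hz | ⟨d', hd', hz, hInB, hc, hn1⟩)
          · exact Or.inl (List.mem_cons_of_mem _ hz)
          · rcases List.mem_cons.mp hd' with rfl | hd'
            · exact Or.inl (hz ▸ List.mem_cons_self ..)
            · by_cases hzc : z = ((x + d.1, y + d.2) : Int × Int)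
              · exact Or.inl (hzc ▸ List.mem_cons_self ..)
              · exact Or.inr ⟨d', hd', hz, hInB, hc, hn1, hzc⟩
      · simp only [List.length_append, List.length_cons, List.length_nil] at ih5 ⊢
        omega
    · have hstep : pvSeenPush bits n m x y (seen, rest) d = (seen, rest) := by
        unfold pvSeenPush; rw [if_neg hC]
      rw [hstep]
      obtain ⟨ih1, ih2, ih3, ih4, ih5⟩ := ih hnd' seen rest hns hnr hsub
      have hdfalse : ∀ z : Int × Int,
          ¬ (z = ((x + d.1, y + d.2) : Int × Int) ∧ pvInB n m z ∧
              pvCell bits z.1 z.2 = true ∧ z ∉ seen) := by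
        rintro z ⟨rfl, hInB, hc, hn1⟩
        exact hC ⟨hInB.1, hInB.2.1, hInB.2.2.1, hInB.2.2.2, hc, hn1⟩
      refine ⟨?_, ?_, ih3, ih4, ih5⟩
      · intro z
        rw [ih1 z]
        constructor
        · rintro (hz | ⟨d', hd', hcond⟩)
          · exact Or.inl hz
          · exact Or.inr ⟨d', List.mem_cons_of_mem _ hd', hcond⟩
        · rintro (hz | ⟨d', hd', hcond⟩)
          · exact Or.inl hz
          · rcases List.mem_cons.mp hd' with rfl | hd'
            · exact absurd hcond (hdfalse z)
            · exact Or.inr ⟨d', hd', hcond⟩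
      · intro z
        rw [ih2 z]
        constructor
        · rintro (hz | ⟨d', hd', hcond⟩)
          · exact Or.inl hz
          · exact Or.inr ⟨d', List.mem_cons_of_mem _ hd', hcond⟩
        · rintro (hz | ⟨d', hd', hcond⟩)
          · exact Or.inl hz
          · rcases List.mem_cons.mp hd' with rfl | hd'
            · exact absurd hcond (hdfalse z)
            · exact Or.inr ⟨d', hd', hcond⟩

-- no reachable cell precedes (i, j) once the search has drained with all
-- processed cells checked and step-closed
lemma pvNoSmall (bits : List (List Bool)) (n m i j : Int) (seen : List (Int × Int))
    (hij : ((i, j) : Int × Int) ∈ seen)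
    (hproc : ∀ c ∈ seen, ¬ pvLex c (i, j) ∧ ∀ e, pvStep bits n m c e → e ∈ seen) :
    ¬ ∃ c : Int × Int, pvReach bits n m (i, j) c ∧ pvLex c (i, j) := by
  have hcl : ∀ c, pvReach bits n m (i, j) c → c ∈ seen := by
    intro c h
    induction h with
    | refl => exact hij
    | @tail b c hb hstep ihc => exact (hproc b ihc).2 c hstep
  rintro ⟨c, hr, hl⟩
  exact (hproc c (hcl c hr)).1 hl

-- characterization of B's search loop: with a sound visited set and enough
-- fuel, it returns true iff no cell reachable from (i, j) precedes (i, j)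
lemma pvHeadLoopChar (bits : List (List Bool)) (n m i j : Int) :
    ∀ (fuel : Nat) (seen todo : List (Int × Int)),
      seen.Nodup → todo.Nodup →
      ((i, j) : Int × Int) ∈ seen →
      (∀ c ∈ todo, c ∈ seen) →
      (∀ c ∈ seen, pvGood bits n m c ∧ pvReach bits n m (i, j) c) →
      (∀ c ∈ seen, c ∉ todo → ¬ pvLex c (i, j) ∧ ∀ e, pvStep bits n m c e → e ∈ seen) →
      todo.length + (n.toNat * m.toNat - seen.length) ≤ fuel →
      (pvHeadLoop bits n m i j fuel seen todo = true ↔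
        ¬ ∃ c : Int × Int, pvReach bits n m (i, j) c ∧ pvLex c (i, j)) := by
  intro fuel
  induction fuel with
  | zero =>
    intro seen todo hns hnt hij hts hGood hproc hfuel
    have htodo : todo = [] := by
      cases todo with
      | nil => rfl
      | cons c rest => simp at hfuel
    subst htodo
    simp only [pvHeadLoop, true_iff]
    exact pvNoSmall bits n m i j seen hij (fun c hc => hproc c hc (by simp))
  | succ fuel ih =>
    intro seen todo hns hnt hij hts hGood hproc hfuel
    rcases todo with _ | ⟨c, rest⟩
    · simp only [pvHeadLoop, true_iff]
      exact pvNoSmall bits n m i j seen hij (fun c hc => hproc c hc (by simp))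
    · simp only [pvHeadLoop]
      have hcseen : c ∈ seen := hts c (List.mem_cons_self ..)
      by_cases hsm : c.1 < i ∨ (c.1 = i ∧ c.2 < j)
      · rw [if_pos hsm]
        have hlex : pvLex c ((i, j) : Int × Int) := hsm
        have hex : ∃ z : Int × Int, pvReach bits n m (i, j) z ∧ pvLex z (i, j) :=
          ⟨c, (hGood c hcseen).2, hlex⟩
        simp only [Bool.false_eq_true, false_iff, not_not]
        exact hex
      · rw [if_neg hsm]
        have hrestnd : rest.Nodup := (List.nodup_cons.mp hnt).2
        have hcnotrest : c ∉ rest := (List.nodup_cons.mp hnt).1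
        have hrestsub : ∀ z ∈ rest, z ∈ seen := fun z hz => hts z (List.mem_cons_of_mem _ hz)
        obtain ⟨P1, P2, P3, P4, P5⟩ :=
          pvPushAux bits n m c.1 c.2 pvOffsets (by decide) seen rest hns hrestnd hrestsub
        have hsub1 : ∀ z ∈ seen,
            z ∈ (pvOffsets.foldl (pvSeenPush bits n m c.1 c.2) (seen, rest)).1 :=
          fun z hz => (P1 z).mpr (Or.inl hz)
        have hij' := hsub1 _ hij
        have hts' : ∀ z ∈ (pvOffsets.foldl (pvSeenPush bits n m c.1 c.2) (seen, rest)).2,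
            z ∈ (pvOffsets.foldl (pvSeenPush bits n m c.1 c.2) (seen, rest)).1 := by
          intro z hz
          rcases (P2 z).mp hz with hz' | hz'
          · exact hsub1 z (hrestsub z hz')
          · exact (P1 z).mpr (Or.inr hz')
        have hnewstep : ∀ z : Int × Int,
            (∃ d ∈ pvOffsets, z = (c.1 + d.1, c.2 + d.2) ∧ pvInB n m z ∧
              pvCell bits z.1 z.2 = true ∧ z ∉ seen) → pvStep bits n m c z := by
          rintro z ⟨d, hd, hz, hInB, hcell, hzs⟩
          have hdne : d ≠ ((0 : Int), (0 : Int)) := by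
            rintro rfl
            apply hzs
            have hzc : z = c := by
              obtain ⟨c1, c2⟩ := c
              simpa using hz
            exact hzc ▸ hcseen
          have hdd : d ∈ pvDirections := pvOffsets_dir d hd hdne
          refine ⟨?_, hInB.1, hInB.2.1, hInB.2.2.1, hInB.2.2.2, hcell⟩
          have hdiff : ((z.1 - c.1, z.2 - c.2) : Int × Int) = d := by
            obtain ⟨d1, d2⟩ := d
            rw [hz]
            simp only [Prod.mk.injEq]
            constructor <;> ring
          rw [hdiff]
          exact hdd
        have hGood' : ∀ z ∈ (pvOffsets.foldl (pvSeenPush bits n m c.1 c.2) (seen, rest)).1,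
            pvGood bits n m z ∧ pvReach bits n m (i, j) z := by
          intro z hz
          rcases (P1 z).mp hz with hz' | hnew
          · exact hGood z hz'
          · obtain ⟨d, hd, hzf, hInB, hcell, hzs⟩ := hnew
            exact ⟨⟨hInB, hcell⟩,
              (hGood c hcseen).2.tail (hnewstep z ⟨d, hd, hzf, hInB, hcell, hzs⟩)⟩
        have hclosure_c : ∀ e, pvStep bits n m c e →
            e ∈ (pvOffsets.foldl (pvSeenPush bits n m c.1 c.2) (seen, rest)).1 := by
          intro e he
          by_cases hes : e ∈ seen
          · exact hsub1 e hes
          · refine (P1 e).mpr (Or.inr ⟨(e.1 - c.1, e.2 - c.2), pvDir_offset _ he.1, ?_,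
              ⟨he.2.1, he.2.2.1, he.2.2.2.1, he.2.2.2.2.1⟩, he.2.2.2.2.2, hes⟩)
            obtain ⟨e1, e2⟩ := e
            simp only [Prod.mk.injEq]
            constructor <;> ring
        have hproc' : ∀ z ∈ (pvOffsets.foldl (pvSeenPush bits n m c.1 c.2) (seen, rest)).1,
            z ∉ (pvOffsets.foldl (pvSeenPush bits n m c.1 c.2) (seen, rest)).2 →
            ¬ pvLex z (i, j) ∧ ∀ e, pvStep bits n m z e →
              e ∈ (pvOffsets.foldl (pvSeenPush bits n m c.1 c.2) (seen, rest)).1 := by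
          intro z hz1 hz2
          rcases (P1 z).mp hz1 with hzs | hnew
          · by_cases hzc : z = c
            · subst hzc
              exact ⟨fun hl => hsm hl, hclosure_c⟩
            · have hznrest : z ∉ rest := fun hmem => hz2 ((P2 z).mpr (Or.inl hmem))
              have hznold : z ∉ c :: rest := by
                intro hm
                rcases List.mem_cons.mp hm with h | h
                · exact hzc h
                · exact hznrest h
              obtain ⟨hl, hcl⟩ := hproc z hzs hznold
              exact ⟨hl, fun e he => hsub1 e (hcl e he)⟩
          · exact absurd ((P2 z).mpr (Or.inr hnew)) hz2
        have hfuel' : (pvOffsets.foldl (pvSeenPush bits n m c.1 c.2) (seen, rest)).2.length +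
            (n.toNat * m.toNat -
              (pvOffsets.foldl (pvSeenPush bits n m c.1 c.2) (seen, rest)).1.length) ≤ fuel := by
          have hb1 : (pvOffsets.foldl (pvSeenPush bits n m c.1 c.2) (seen, rest)).1.length ≤
              n.toNat * m.toNat :=
            pvLenBound n m _ P3 (fun z hz => ((hGood' z hz).1).1)
          have hb2 : seen.length ≤
              (pvOffsets.foldl (pvSeenPush bits n m c.1 c.2) (seen, rest)).1.length :=
            pvNodupSubLen seen _ hns P3 hsub1
          simp only [List.length_cons] at hfuel
          omega
        exact ih _ _ P3 P4 hij' hts' hGood' hproc' hfuel'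

-- the helper's entry point, on a live in-bounds cell
lemma pvHeadTrue (bits : List (List Bool)) (n m i j : Int)
    (hb : pvInB n m ((i, j) : Int × Int)) (ht : pvCell bits i j = true) :
    (pvIsHead bits n m i j = true ↔
      ¬ ∃ c : Int × Int, pvReach bits n m (i, j) c ∧ pvLex c (i, j)) := by
  unfold pvIsHead
  apply pvHeadLoopChar bits n m i j (n.toNat * m.toNat + 1) [(i, j)] [(i, j)]
  · simp
  · simp
  · simp
  · simp
  · intro c hc
    rcases List.mem_singleton.mp hc with rfl
    exact ⟨⟨hb, ht⟩, Relation.ReflTransGen.refl⟩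
  · intro c hc hnc
    rcases List.mem_singleton.mp hc with rfl
    exact absurd (List.mem_singleton.mpr rfl) hnc
  · simp only [List.length_cons, List.length_nil]
    omega

-- the row-major scan order both outer double loops follow
def pvScan (n m : Int) : List (Int × Int) :=
  (PySem.List.pyRange 0 n 1).flatMap (fun i => (PySem.List.pyRange 0 m 1).map (fun j => (i, j)))

lemma pvScan_mem (n m : Int) (p : Int × Int) : p ∈ pvScan n m ↔ pvInB n m p := by
  unfold pvScan pvInB
  simp only [List.mem_flatMap, List.mem_map, PySem.List.mem_pyRange_one]
  constructor
  · rintro ⟨a, ha, b, hb, rfl⟩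
    exact ⟨ha.1, ha.2, hb.1, hb.2⟩
  · rintro ⟨h1, h2, h3, h4⟩
    exact ⟨p.1, ⟨h1, h2⟩, p.2, ⟨h3, h4⟩, rfl⟩

lemma pvScan_pairwise (n m : Int) : (pvScan n m).Pairwise pvLex := by
  unfold pvScan
  rw [List.pairwise_flatMap]
  constructor
  · intro a _
    rw [List.pairwise_map]
    exact (PySem.List.pairwise_lt_pyRange_one 0 m).imp (fun hxy => Or.inr ⟨rfl, hxy⟩)
  · refine (PySem.List.pairwise_lt_pyRange_one 0 n).imp ?_
    rintro a b hab x hx y hy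
    rcases List.mem_map.mp hx with ⟨j1, -, rfl⟩
    rcases List.mem_map.mp hy with ⟨j2, -, rfl⟩
    exact Or.inl hab

-- the two loop bodies as functions of the scanned pair
def pvBodyA (n m : Int) (st : List (List Bool) × Int) (p : Int × Int) :
    List (List Bool) × Int :=
  if pvCell st.1 p.1 p.2 = true then
    (pvBfsLoop n m (pvTrueCount (pvSet st.1 p.1 p.2) + 1) (pvSet st.1 p.1 p.2) [(p.1, p.2)],
     st.2 + 1)
  else st

def pvBodyB (bits : List (List Bool)) (n m : Int) (c : Int) (p : Int × Int) : Int :=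
  if pvCell bits p.1 p.2 && pvIsHead bits n m p.1 p.2 then c + 1 else c

-- the main induction: over any suffix of the scan, A's destructive fold counts
-- exactly the cells B's pure head test accepts
lemma pvMainInd (bits : List (List Bool)) (n m : Int) :
    ∀ (rest pre : List (Int × Int)), pvScan n m = pre ++ rest →
      ∀ (g : List (List Bool)) (cnt : Int),
      (∀ x y : Int, pvCell g x y = true ↔ pvCell bits x y = true ∧
          ¬ ∃ q ∈ pre, pvCell bits q.1 q.2 = true ∧ pvReach bits n m q (x, y)) →
      (rest.foldl (pvBodyA n m) (g, cnt)).2 = rest.foldl (pvBodyB bits n m) cnt := by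
  intro rest
  induction rest with
  | nil => intro pre hsplit g cnt hchar; simp
  | cons p rest ih =>
    intro pre hsplit g cnt hchar
    have hpscan : p ∈ pvScan n m := by
      rw [hsplit]; exact List.mem_append.mpr (Or.inr (List.mem_cons_self ..))
    have hpInB : pvInB n m p := (pvScan_mem n m p).mp hpscan
    have hpair := pvScan_pairwise n m
    rw [hsplit] at hpair
    obtain ⟨-, hpair2, hpair3⟩ := List.pairwise_append.mp hpair
    have hpre_lt : ∀ q ∈ pre, pvLex q p := fun q hq => hpair3 q hq p (List.mem_cons_self ..)
    have hrest_gt : ∀ q ∈ rest, pvLex p q := (List.pairwise_cons.mp hpair2).1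
    have hsplit' : pvScan n m = (pre ++ [p]) ++ rest := by rw [hsplit]; simp
    rw [List.foldl_cons, List.foldl_cons]
    by_cases hbp : pvCell bits p.1 p.2 = true
    · by_cases hEr : ∃ q ∈ pre, pvCell bits q.1 q.2 = true ∧ pvReach bits n m q p
      · -- p's region was erased by an earlier seed: A skips, B's head test fails
        have hgp : pvCell g p.1 p.2 ≠ true := fun hcell => ((hchar p.1 p.2).mp hcell).2 hEr
        have hA : pvBodyA n m (g, cnt) p = (g, cnt) := by unfold pvBodyA; rw [if_neg hgp]
        obtain ⟨q, hqpre, hqT, hqR⟩ := hEr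
        have hqInB : pvInB n m q := (pvScan_mem n m q).mp
          (by rw [hsplit]; exact List.mem_append.mpr (Or.inl hqpre))
        have hpq : pvReach bits n m p q :=
          (pvReach_symm bits n m q p ⟨hqInB, hqT⟩ hqR).1
        have hIH : pvIsHead bits n m p.1 p.2 ≠ true := by
          intro htrue
          rw [pvHeadTrue bits n m p.1 p.2 hpInB hbp] at htrue
          exact htrue ⟨q, hpq, hpre_lt q hqpre⟩
        have hB : pvBodyB bits n m cnt p = cnt := by
          unfold pvBodyB
          rw [if_neg (by simp only [Bool.and_eq_true]; tauto)]
        rw [hA, hB]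
        apply ih (pre ++ [p]) hsplit' g cnt
        intro x y
        rw [hchar x y]
        constructor
        · rintro ⟨hc, hno⟩
          refine ⟨hc, ?_⟩
          rintro ⟨q', hq', hq'T, hq'R⟩
          rcases List.mem_append.mp hq' with hq' | hq'
          · exact hno ⟨q', hq', hq'T, hq'R⟩
          · rcases List.mem_singleton.mp hq' with rfl
            exact hno ⟨q, hqpre, hqT, hqR.trans hq'R⟩
        · rintro ⟨hc, hno⟩
          exact ⟨hc, fun ⟨q', hq', hq'T, hq'R⟩ =>
            hno ⟨q', List.mem_append.mpr (Or.inl hq'), hq'T, hq'R⟩⟩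
      · -- p is the first cell of a fresh region: both sides count it
        have hgp : pvCell g p.1 p.2 = true := (hchar p.1 p.2).mpr ⟨hbp, hEr⟩
        have hA : pvBodyA n m (g, cnt) p =
            (pvBfsLoop n m (pvTrueCount (pvSet g p.1 p.2) + 1) (pvSet g p.1 p.2)
              [(p.1, p.2)], cnt + 1) := by
          unfold pvBodyA; rw [if_pos hgp]
        have hGp : pvGood bits n m p := ⟨hpInB, hbp⟩
        have hIH : pvIsHead bits n m p.1 p.2 = true := by
          rw [pvHeadTrue bits n m p.1 p.2 hpInB hbp]
          rintro ⟨c, hr, hl⟩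
          have hl' : c.1 < p.1 ∨ (c.1 = p.1 ∧ c.2 < p.2) := hl
          have hsym := pvReach_symm bits n m p c hGp hr
          rcases hsym.2 with hceq | hGc
          · rw [hceq] at hl'; omega
          · have hcscan : c ∈ pvScan n m := (pvScan_mem n m c).mpr hGc.1
            rw [hsplit] at hcscan
            rcases List.mem_append.mp hcscan with hcpre | hcrest
            · exact hEr ⟨c, hcpre, hGc.2, hsym.1⟩
            · rcases List.mem_cons.mp hcrest with hceq | hcrest
              · rw [hceq] at hl'; omega
              · have hgt : p.1 < c.1 ∨ (p.1 = c.1 ∧ p.2 < c.2) := hrest_gt c hcrest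
                omega
        have hB : pvBodyB bits n m cnt p = cnt + 1 := by
          unfold pvBodyB
          rw [if_pos (by rw [hbp, hIH]; rfl)]
        rw [hA, hB]
        apply ih (pre ++ [p]) hsplit' _ (cnt + 1)
        have hEcl : ∀ c d : Int × Int,
            (∃ q ∈ pre, pvCell bits q.1 q.2 = true ∧ pvReach bits n m q c) →
            pvReach bits n m c d →
            (∃ q ∈ pre, pvCell bits q.1 q.2 = true ∧ pvReach bits n m q d) := by
          rintro c d ⟨q, hq, hqT, hqR⟩ hcd
          exact ⟨q, hq, hqT, hqR.trans hcd⟩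
        have htrans := pvReachTransfer bits g n m
          (fun c => ∃ q ∈ pre, pvCell bits q.1 q.2 = true ∧ pvReach bits n m q c)
          (fun x y => hchar x y) hEcl p hpInB hgp
        have hseed := pvSeedChar n m g p.1 p.2 hgp
        intro x y
        rw [hseed x y]
        constructor
        · rintro ⟨hcg, hnr⟩
          obtain ⟨hcb, hnold⟩ := (hchar x y).mp hcg
          refine ⟨hcb, ?_⟩
          rintro ⟨q', hq', hq'T, hq'R⟩
          rcases List.mem_append.mp hq' with hq' | hq'
          · exact hnold ⟨q', hq', hq'T, hq'R⟩
          · rcases List.mem_singleton.mp hq' with rfl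
            exact hnr ((htrans (x, y)).mpr hq'R)
        · rintro ⟨hcb, hnew⟩
          have hnold : ¬ ∃ q ∈ pre, pvCell bits q.1 q.2 = true ∧ pvReach bits n m q (x, y) :=
            fun ⟨q', hq', hq'T, hq'R⟩ =>
              hnew ⟨q', List.mem_append.mpr (Or.inl hq'), hq'T, hq'R⟩
          refine ⟨(hchar x y).mpr ⟨hcb, hnold⟩, ?_⟩
          intro hr
          exact hnew ⟨p, List.mem_append.mpr (Or.inr (List.mem_singleton.mpr rfl)), hbp,
            (htrans (x, y)).mp hr⟩
    · -- a dead cell: both sides skip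
      have hgp : pvCell g p.1 p.2 ≠ true := fun hcell => hbp ((hchar p.1 p.2).mp hcell).1
      have hA : pvBodyA n m (g, cnt) p = (g, cnt) := by unfold pvBodyA; rw [if_neg hgp]
      have hB : pvBodyB bits n m cnt p = cnt := by
        unfold pvBodyB
        rw [if_neg (by simp only [Bool.and_eq_true]; tauto)]
      rw [hA, hB]
      apply ih (pre ++ [p]) hsplit' g cnt
      intro x y
      rw [hchar x y]
      constructor
      · rintro ⟨hc, hno⟩
        refine ⟨hc, ?_⟩
        rintro ⟨q', hq', hq'T, hq'R⟩
        rcases List.mem_append.mp hq' with hq' | hq'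
        · exact hno ⟨q', hq', hq'T, hq'R⟩
        · rcases List.mem_singleton.mp hq' with rfl
          exact absurd hq'T hbp
      · rintro ⟨hc, hno⟩
        exact ⟨hc, fun ⟨q', hq', hq'T, hq'R⟩ =>
          hno ⟨q', List.mem_append.mpr (Or.inl hq'), hq'T, hq'R⟩⟩

lemma pvFoldFixed {α β : Type} (l : List α) (init : β) :
    l.foldl (fun st _ => st) init = init := by
  induction l with
  | nil => rfl
  | cons a t ih => rw [List.foldl_cons]; exact ih

lemma pvMainEq (bits : List (List Bool)) (n m : Int) :
    find_successive_area_number bits n m = find_successive_area_number_alt bits n m := by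
  unfold find_successive_area_number find_successive_area_number_alt
  by_cases h0 : n = 0 ∨ m = 0
  case pos =>
    rw [if_pos h0, if_pos (by rcases h0 with h | h <;> omega)]
  case neg =>
  rw [if_neg h0]
  by_cases hG : ¬ (n ≤ (bits.length : Int) ∧ ∀ row ∈ bits.take n.toNat, m ≤ (row.length : Int))
  case pos =>
    rw [if_pos hG]
    by_cases hb : n ≤ 0 ∨ m ≤ 0
    · rw [if_pos hb]
    · rw [if_neg hb, if_pos hG]
  case neg =>
  rw [if_neg hG]
  by_cases hpos : 0 < n ∧ 0 < m
  case neg =>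
    rw [if_pos (show n ≤ 0 ∨ m ≤ 0 by omega)]
    rcases (show n < 0 ∨ m < 0 by omega) with hlt | hlt
    · rw [PySem.List.pyRange_one_eq_nil (show n ≤ 0 by omega)]
      rfl
    · rw [PySem.List.pyRange_one_eq_nil (show m ≤ 0 by omega)]
      simp only [List.foldl_nil]
      rw [pvFoldFixed]
  case pos =>
    rw [if_neg (by omega), if_neg hG]
    have hA : ((PySem.List.pyRange 0 n 1).foldl (fun st i =>
        (PySem.List.pyRange 0 m 1).foldl (fun (st : List (List Bool) × Int) j =>
          if pvCell st.1 i j = true then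
            (pvBfsLoop n m (pvTrueCount (pvSet st.1 i j) + 1) (pvSet st.1 i j) [(i, j)],
             st.2 + 1)
          else st) st) ((bits, 0) : List (List Bool) × Int)) =
        (pvScan n m).foldl (pvBodyA n m) (bits, 0) := by
      unfold pvScan
      rw [List.foldl_flatMap]
      simp only [List.foldl_map]
      rfl
    have hB : ((PySem.List.pyRange 0 n 1).foldl (fun (c : Int) i =>
        (PySem.List.pyRange 0 m 1).foldl (fun (c : Int) j =>
          if pvCell bits i j && pvIsHead bits n m i j then c + 1 else c) c) 0) =
        (pvScan n m).foldl (pvBodyB bits n m) 0 := by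
      unfold pvScan
      rw [List.foldl_flatMap]
      simp only [List.foldl_map]
      rfl
    rw [hA, hB]
    exact pvMainInd bits n m (pvScan n m) [] (by simp) bits 0 (by intro x y; simp)

-- ===== VERDICT (by name: the statement is the Claim_ definition above) =====
theorem find_successive_area_number_spec : Claim_equal_find_successive_area_number := by
  intro bits n m _ _
  unfold Spec_find_successive_area_number
  exact pvMainEq bits n m
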